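-- pv_equiv track=rewrite | github.com/jawadafkar/TUKE | Python/Assignment1/assignment1.py | get_most_common_region
-- ===== SOURCE A (Python) =====
-- def get_most_common_region(records):  # 1b
--     dist_code = {}
--     for r in records:
--         if r[0][:2] not in dist_code:
--             dist_code[r[0][:2]] = 0
--         dist_code[r[0][:2]] += 1
--
--     m = max(dist_code.values())
--     for region, occurence in dist_code.items():
--         if occurence == m:
--             return region
-- ===== SOURCE B (Python) =====
-- def get_most_common_region(records):
--     ps = [r[0][:2] for r in records]
--     seen = []
--     for p in ps:
--         if p not in seen:
--             seen.append(p)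
--     return max(seen, key=ps.count)
-- ===== Notes on version B (the rewrite author's own statement) =====
-- stated objective: alternative
-- what changed: Replaces A's incrementally-built count dictionary (then max over its values and a second scan of its items) by an ordered dedup of the 2-char prefix list followed by max(seen, key=ps.count), which picks the earliest-appearing most common prefix directly.
import Mathlib
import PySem

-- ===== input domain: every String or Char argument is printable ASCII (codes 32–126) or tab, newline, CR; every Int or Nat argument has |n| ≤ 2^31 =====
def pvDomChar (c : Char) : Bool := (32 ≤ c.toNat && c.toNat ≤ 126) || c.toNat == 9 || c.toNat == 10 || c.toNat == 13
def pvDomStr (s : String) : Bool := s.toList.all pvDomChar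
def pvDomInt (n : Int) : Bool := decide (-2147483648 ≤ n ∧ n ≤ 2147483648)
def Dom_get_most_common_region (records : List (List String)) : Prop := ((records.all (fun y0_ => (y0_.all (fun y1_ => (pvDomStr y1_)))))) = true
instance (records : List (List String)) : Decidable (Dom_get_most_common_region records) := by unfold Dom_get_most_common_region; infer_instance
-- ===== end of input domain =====

-- B replaces A's incrementally-built count dict by an ordered dedup of the prefix list plus
-- max(seen, key=ps.count); same return value, a different decomposition (objective: alternative).

-- ===== PORT A =====
-- r[0][:2]; the .getD "" is unreachable under Pre_ (r ≠ []), where Python would raise IndexError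
def pvPrefix2 (r : List String) : String :=
  PySem.Str.slice ((PySem.List.pyGet? r 0).getD "") none (some 2)

def get_most_common_region (records : List (List String)) : String :=
  let dist_code : PySem.Dict String Int :=
    records.foldl (fun d r =>
      let k := pvPrefix2 r
      let d := if d.contains k then d else d.insert k 0
      -- d[k] += 1 (k is present at this point, so getD's default is never used)
      d.modify k 0 (· + 1)) PySem.Dict.empty
  match PySem.List.max? dist_code.values (fun v => v) with
  | none => ""    -- max([]) raises ValueError in Python: outside Pre_
  | some m =>
    match dist_code.items.find? (fun p => p.2 == m) with
    | some p => p.1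
    | none => ""  -- Python falls off the loop returning None; unreachable (m is a value of the dict)

-- ===== PORT B =====
def get_most_common_region_alt (records : List (List String)) : String :=
  let ps := records.map pvPrefix2
  let seen := ps.foldl (fun acc p => if p ∈ acc then acc else acc ++ [p]) []
  match PySem.List.max? seen (fun p => (PySem.List.count ps p : Int)) with
  | some x => x
  | none => ""    -- max([]) raises ValueError in Python: outside Pre_

-- ===== PRECONDITION & SPEC =====
-- A raises ValueError on empty records and IndexError when some record is the empty list;
-- Pre_ excludes exactly those inputs (B raises there too).
def Pre_get_most_common_region (records : List (List String)) : Prop :=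
  records ≠ [] ∧ ∀ r ∈ records, r ≠ []
instance (records : List (List String)) : Decidable (Pre_get_most_common_region records) := by
  unfold Pre_get_most_common_region; infer_instance

def pvWitness_get_most_common_region : List (List String) :=
  [["AB101", "x"], ["CD7"], ["AB9", "y"]]

def Spec_get_most_common_region (records : List (List String)) (out : String) : Prop :=
  out = get_most_common_region_alt records
instance (records : List (List String)) (out : String) : Decidable (Spec_get_most_common_region records out) := by
  unfold Spec_get_most_common_region; infer_instance

-- ===== CLAIM (what is proved, stated in full; the proofs are below) =====
def Claim_equal_get_most_common_region : Prop := ∀ (records : List (List String)), Dom_get_most_common_region records → Pre_get_most_common_region records → Spec_get_most_common_region records (get_most_common_region records)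

-- ===== LEMMAS AND PROOFS =====

-- A's per-element dict step is exactly the Counter step
theorem pvStep_eq (d : PySem.Dict String Int) (k : String) :
    ((if d.contains k then d else d.insert k 0).modify k 0 (· + 1)) = d.modify k 0 (· + 1) := by
  by_cases h : d.contains k
  · simp [h]
  · have h' : d.contains k = false := by simpa using h
    simp only [h', Bool.false_eq_true, if_false, PySem.Dict.modify,
      PySem.Dict.insert_insert_self, PySem.Dict.getD_insert_self,
      PySem.Dict.getD_of_not_contains d 0 h']

-- B's seen-loop is PySem.Set.ofList
theorem pvSeen_eq (ps : List String) :
    ps.foldl (fun acc p => if p ∈ acc then acc else acc ++ [p]) [] = PySem.Set.ofList ps := by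
  rw [PySem.Set.ofList_eq_foldl]
  apply PySem.List.foldl_congr_mem
  intro acc x _
  simp [PySem.Set.add, PySem.Set.contains]

-- max? on a cons is a plain fold with a seeded accumulator
theorem pvMax?_cons {α : Type} (f : α → Int) (x : α) (t : List α) :
    PySem.List.max? (x :: t) f =
      some (t.foldl (fun m y => if f m < f y then y else m) x) := by
  show List.foldl _ (some x) t = _
  induction t generalizing x with
  | nil => rfl
  | cons y t ih =>
    simp only [List.foldl_cons]
    by_cases h : f x < f y <;> simp [h, ih]

-- the first element whose key equals the running max IS max? (first extremal element)
theorem pvFindMax (f : α → Int) (t : List α) : ∀ (x : α),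
    (x :: t).find? (fun k => f k == (t.map f).foldl max (f x)) =
      some (t.foldl (fun m y => if f m < f y then y else m) x) := by
  induction t with
  | nil => intro x; simp [List.find?]
  | cons y t ih =>
    intro x
    simp only [List.map_cons, List.foldl_cons]
    by_cases h : f x < f y
    · have hM : ∀ M, f y ≤ M → (f x == M) = false := by
        intro M hle
        simp only [beq_eq_false_iff_ne, ne_eq]
        intro he; omega
      have hmax : max (f x) (f y) = f y := by omega
      have hy : f y ≤ (t.map f).foldl max (f y) :=
        (PySem.List.le_foldl_max (t.map f) (f y)).1
      rw [List.find?_cons_of_neg (by simp [hmax, hM _ hy]), hmax]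
      simpa [h] using ih y
  -- f y ≤ f x: the running best stays x; y can match the max only if x already did
    · have hmax : max (f x) (f y) = f x := by omega
      rw [hmax]
      by_cases hx : (f x == (t.map f).foldl max (f x)) = true
      · rw [List.find?_cons_of_pos (by simpa using hx)]
        have := ih x
        rw [List.find?_cons_of_pos (by simpa using hx)] at this
        simpa [show ¬ f x < f y by omega] using this
      · have hxM : f x ≠ (t.map f).foldl max (f x) := by simpa using hx
        have hyM : (f y == (t.map f).foldl max (f x)) = false := by
          have hxle : f x ≤ (t.map f).foldl max (f x) :=
            (PySem.List.le_foldl_max (t.map f) (f x)).1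
          simp only [beq_eq_false_iff_ne, ne_eq]
          intro he; omega
        rw [List.find?_cons_of_neg (by simp [hx]), List.find?_cons_of_neg (by simp [hyM])]
        have := ih x
        rw [List.find?_cons_of_neg (by simp [hx])] at this
        simpa [show ¬ f x < f y by omega] using this

-- ===== VERDICT (by name: the statement is the Claim_ definition above) =====
theorem get_most_common_region_spec : Claim_equal_get_most_common_region := by
  intro records _ hpre
  unfold Spec_get_most_common_region
  obtain ⟨hne, -⟩ := hpre
  simp only [get_most_common_region, get_most_common_region_alt]
  -- A's fold over records is the Counter of the prefix list; B's seen-loop is its ordered dedup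
  rw [show List.foldl
        (fun d r => (if d.contains (pvPrefix2 r) = true then d else d.insert (pvPrefix2 r) 0).modify
          (pvPrefix2 r) 0 fun x => x + 1) PySem.Dict.empty records
      = PySem.Dict.counter (records.map pvPrefix2) by
    rw [PySem.Dict.counter_eq_foldl, List.foldl_map]
    exact PySem.List.foldl_congr_mem _ _ _ _ (fun acc x _ => pvStep_eq acc (pvPrefix2 x)),
    pvSeen_eq]
  set ps := records.map pvPrefix2 with hps
  set f : String → Int := fun k => (PySem.List.count ps k : Int) with hf
  have hpsne : ps ≠ [] := by simpa [hps] using hne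
  obtain ⟨s0, S', hS⟩ : ∃ s0 S', PySem.Set.ofList ps = s0 :: S' := by
    obtain ⟨p0, ps', hcons⟩ := List.exists_cons_of_ne_nil hpsne
    refine List.exists_cons_of_ne_nil (fun hnil => ?_)
    have : p0 ∈ PySem.Set.ofList ps := by
      rw [PySem.Set.mem_ofList]; exact hcons ▸ List.mem_cons_self
    simp [hnil] at this
  have hitems : (PySem.Dict.counter ps).items
      = (s0 :: S').map (fun k => (k, f k)) := by
    rw [PySem.Dict.items_counter, hS, hf]; rfl
  have hvalues : (PySem.Dict.counter ps).values = f s0 :: S'.map f := by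
    show ((PySem.Dict.counter ps).items).map (·.2) = _
    simp [hitems]
  rw [hvalues, hitems, hS, PySem.List.max?_id_cons, pvMax?_cons]
  simp only [List.find?_map, Function.comp_def]
  rw [pvFindMax f S' s0]
  simp
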